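-- pv_equiv track=rewrite | github.com/shem2019/varbox | scorecard_generator.py | _hand_totals
-- ===== SOURCE A (Python) =====
-- from typing import Any, Dict, Iterable, List, Optional
--
-- def _hand_totals(rows: List[Dict]) -> Dict[str, Dict[str, int]]:
--     res = {"RED": {"L": 0, "R": 0, "ANY": 0}, "BLUE": {"L": 0, "R": 0, "ANY": 0}}
--     for r in rows:
--         role = r.get("role")
--         hand = r.get("hand", "ANY")
--         if role in res:
--             if hand in ("L", "R"):
--                 res[role][hand] += 1
--             res[role]["ANY"] += 1
--     return res
-- ===== SOURCE B (Python) =====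
-- from typing import Dict, List
--
--
-- def _hand_totals(rows: List[Dict]) -> Dict[str, Dict[str, int]]:
--     res = {}
--     for role in ("RED", "BLUE"):
--         hands = [r.get("hand", "ANY") for r in rows if r.get("role") == role]
--         res[role] = {"L": hands.count("L"), "R": hands.count("R"), "ANY": len(hands)}
--     return res
-- ===== Notes on version B (the rewrite author's own statement) =====
-- stated objective: alternative
-- what changed: Replaced the single pass with inline branching and in-place nested-dict increments by a per-role pass: for each fixed role, collect the hands of matching rows once and assemble its totals from hands.count('L'), hands.count('R') and len(hands).
import Mathlib
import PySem

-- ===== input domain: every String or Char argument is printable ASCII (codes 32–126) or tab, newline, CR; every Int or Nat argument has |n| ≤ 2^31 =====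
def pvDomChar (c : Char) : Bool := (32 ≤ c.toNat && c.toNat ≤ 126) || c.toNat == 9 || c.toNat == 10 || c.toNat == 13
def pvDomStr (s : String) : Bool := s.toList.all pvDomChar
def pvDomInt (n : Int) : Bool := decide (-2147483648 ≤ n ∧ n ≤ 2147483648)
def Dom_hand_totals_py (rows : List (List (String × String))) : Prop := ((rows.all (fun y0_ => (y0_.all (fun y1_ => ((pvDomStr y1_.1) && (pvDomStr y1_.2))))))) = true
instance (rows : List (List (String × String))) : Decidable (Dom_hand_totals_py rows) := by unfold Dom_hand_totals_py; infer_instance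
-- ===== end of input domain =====

-- B replaces A's single pass with branching and in-place nested-dict increments by a per-role
-- pass that collects matching hands and counts them (alternative decomposition, same cost).


-- ===== PORT A =====
-- one step of A's loop body; r.get(k) / r.get(k, dflt) via PySem.Dict on the row's pairs.
-- res[role][hand] += 1 is ported as Dict.modify with default 0: the keys "L"/"R"/"ANY" are
-- always present in res's inner dicts, so the default is never used (exact here).
def handApply (res : PySem.Dict String (PySem.Dict String Int)) (role : Option String)
    (hand : String) : PySem.Dict String (PySem.Dict String Int) :=
  match role with
  | none => res
  | some ro =>
    if res.contains ro then
      let res1 := if hand == "L" || hand == "R" then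
          res.modify ro PySem.Dict.empty (fun inner => inner.modify hand 0 (· + 1))
        else res
      res1.modify ro PySem.Dict.empty (fun inner => inner.modify "ANY" 0 (· + 1))
    else res

def handStepA (res : PySem.Dict String (PySem.Dict String Int)) (r : List (String × String)) :
    PySem.Dict String (PySem.Dict String Int) :=
  handApply res ((PySem.Dict.mk r).get? "role") ((PySem.Dict.mk r).getD "hand" "ANY")

def handRes0 : PySem.Dict String (PySem.Dict String Int) :=
  PySem.Dict.ofList
    [("RED", PySem.Dict.ofList [("L", 0), ("R", 0), ("ANY", 0)]),
     ("BLUE", PySem.Dict.ofList [("L", 0), ("R", 0), ("ANY", 0)])]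

def hand_totals_py (rows : List (List (String × String))) : List (String × List (String × Int)) :=
  ((rows.foldl handStepA handRes0).items.map (fun p => (p.1, p.2.items)))

-- ===== PORT B =====
def hand_totals_py_alt (rows : List (List (String × String))) : List (String × List (String × Int)) :=
  ["RED", "BLUE"].map (fun role =>
    let hands := (rows.filter (fun r => (PySem.Dict.mk r).get? "role" == some role)).map
        (fun r => (PySem.Dict.mk r).getD "hand" "ANY")
    (role, [("L", (hands.count "L" : Int)), ("R", (hands.count "R" : Int)),
            ("ANY", (hands.length : Int))]))

-- ===== PRECONDITION & SPEC =====
def Spec_hand_totals_py (rows : List (List (String × String))) (out : List (String × List (String × Int))) : Prop := out = hand_totals_py_alt rows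
instance (rows : List (List (String × String))) (out : List (String × List (String × Int))) : Decidable (Spec_hand_totals_py rows out) := by unfold Spec_hand_totals_py; infer_instance

-- ===== CLAIM (what is proved, stated in full; the proofs are below) =====
def Claim_equal_hand_totals_py : Prop := ∀ (rows : List (List (String × String))), Dom_hand_totals_py rows → Spec_hand_totals_py rows (hand_totals_py rows)

-- ===== LEMMAS AND PROOFS =====

-- the literal shape A's accumulator keeps throughout the loop
def handResLit (a b c d e f : Int) : PySem.Dict String (PySem.Dict String Int) :=
  PySem.Dict.mk
    [("RED", PySem.Dict.mk [("L", a), ("R", b), ("ANY", c)]),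
     ("BLUE", PySem.Dict.mk [("L", d), ("R", e), ("ANY", f)])]

-- how one row with role ro / hand h updates the literal shape
def roleHit (rows : List (List (String × String))) (ro h : String) : Int :=
  ((rows.filter (fun r => (PySem.Dict.mk r).get? "role" == some ro)).map
      (fun r => (PySem.Dict.mk r).getD "hand" "ANY")).count h

def roleLen (rows : List (List (String × String))) (ro : String) : Int :=
  ((rows.filter (fun r => (PySem.Dict.mk r).get? "role" == some ro)).map
      (fun r => (PySem.Dict.mk r).getD "hand" "ANY")).length

lemma handApply_red (a b c d e f : Int) (h : String) :
    handApply (handResLit a b c d e f) (some "RED") h =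
      handResLit (a + if h = "L" then 1 else 0) (b + if h = "R" then 1 else 0) (c + 1) d e f := by
  by_cases hL : h = "L"
  · subst hL
    simp [handApply, handResLit, PySem.Dict.contains, PySem.Dict.modify,
      PySem.Dict.insert, PySem.Dict.getD, PySem.Dict.get?, PySem.Dict.empty]
  · by_cases hRh : h = "R"
    · subst hRh
      simp [handApply, handResLit, PySem.Dict.contains, PySem.Dict.modify,
        PySem.Dict.insert, PySem.Dict.getD, PySem.Dict.get?, PySem.Dict.empty]
    · simp [handApply, handResLit, hL, hRh, PySem.Dict.contains, PySem.Dict.modify,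
        PySem.Dict.insert, PySem.Dict.getD, PySem.Dict.get?, PySem.Dict.empty]

lemma handApply_blue (a b c d e f : Int) (h : String) :
    handApply (handResLit a b c d e f) (some "BLUE") h =
      handResLit a b c (d + if h = "L" then 1 else 0) (e + if h = "R" then 1 else 0) (f + 1) := by
  by_cases hL : h = "L"
  · subst hL
    simp [handApply, handResLit, PySem.Dict.contains, PySem.Dict.modify,
      PySem.Dict.insert, PySem.Dict.getD, PySem.Dict.get?, PySem.Dict.empty]
  · by_cases hRh : h = "R"
    · subst hRh
      simp [handApply, handResLit, PySem.Dict.contains, PySem.Dict.modify,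
        PySem.Dict.insert, PySem.Dict.getD, PySem.Dict.get?, PySem.Dict.empty]
    · simp [handApply, handResLit, hL, hRh, PySem.Dict.contains, PySem.Dict.modify,
        PySem.Dict.insert, PySem.Dict.getD, PySem.Dict.get?, PySem.Dict.empty]

lemma handApply_none (a b c d e f : Int) (h : String) :
    handApply (handResLit a b c d e f) none h = handResLit a b c d e f := by
  simp [handApply]

lemma handApply_other (a b c d e f : Int) (ro h : String)
    (hR : ro ≠ "RED") (hB : ro ≠ "BLUE") :
    handApply (handResLit a b c d e f) (some ro) h = handResLit a b c d e f := by
  simp [handApply, handResLit, PySem.Dict.contains, Ne.symm hR, Ne.symm hB]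

lemma roleHit_cons (r : List (String × String)) (rows : List (List (String × String)))
    (ro h : String) :
    roleHit (r :: rows) ro h = roleHit rows ro h +
      (if (PySem.Dict.mk r).get? "role" = some ro ∧ (PySem.Dict.mk r).getD "hand" "ANY" = h
       then 1 else 0) := by
  by_cases hp : (PySem.Dict.mk r).get? "role" = some ro
  · simp only [roleHit, List.filter_cons, beq_iff_eq, hp, if_pos, List.map_cons,
      List.count_cons, true_and]  -- keep: unfolds the cons step

    split_ifs <;> simp_all
  · simp [roleHit, hp]

lemma roleLen_cons (r : List (String × String)) (rows : List (List (String × String)))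
    (ro : String) :
    roleLen (r :: rows) ro = roleLen rows ro +
      (if (PySem.Dict.mk r).get? "role" = some ro then 1 else 0) := by
  by_cases hp : (PySem.Dict.mk r).get? "role" = some ro
  · simp [roleLen, hp]
  · simp [roleLen, hp]

lemma handFold_lit (rows : List (List (String × String))) (a b c d e f : Int) :
    rows.foldl handStepA (handResLit a b c d e f) =
      handResLit (a + roleHit rows "RED" "L") (b + roleHit rows "RED" "R")
        (c + roleLen rows "RED") (d + roleHit rows "BLUE" "L") (e + roleHit rows "BLUE" "R")
        (f + roleLen rows "BLUE") := by
  induction rows generalizing a b c d e f with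
  | nil => simp [roleHit, roleLen]
  | cons r rows ih =>
    rw [List.foldl_cons]
    cases hro : (PySem.Dict.mk r).get? "role" with
    | none =>
      rw [handStepA, hro, handApply_none, ih]
      simp only [roleHit_cons, roleLen_cons, hro, handResLit]
      simp
    | some ro =>
      by_cases hR : ro = "RED"
      · subst hR
        rw [handStepA, hro, handApply_red, ih]
        simp only [roleHit_cons, roleLen_cons, hro, handResLit]
        norm_num
        split_ifs
        all_goals simp_all [add_comm, add_left_comm]
      · by_cases hB : ro = "BLUE"
        · subst hB
          rw [handStepA, hro, handApply_blue, ih]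
          simp only [roleHit_cons, roleLen_cons, hro, handResLit]
          norm_num
          split_ifs
          all_goals simp_all [add_comm, add_left_comm]
        · rw [handStepA, hro, handApply_other _ _ _ _ _ _ _ _ hR hB, ih]
          simp [roleHit_cons, roleLen_cons, hro, hR, hB]

-- ===== VERDICT (by name: the statement is the Claim_ definition above) =====
theorem hand_totals_py_spec : Claim_equal_hand_totals_py := by
  intro rows _
  show hand_totals_py rows = hand_totals_py_alt rows
  have h0 : handRes0 = handResLit 0 0 0 0 0 0 := by decide
  rw [hand_totals_py, h0, handFold_lit]
  simp [handResLit, hand_totals_py_alt, roleHit, roleLen]
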